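-- pv_equiv track=rewrite | github.com/SauravSinha76/scaler | contest1/to_decimal.py | solve
-- ===== SOURCE A (Python) =====
-- def solve(A,B):
--     pow =1
--     ans = 0
--     for i in range(B):
--         pow *= 2
--
--     for i in range(A):
--         ans += pow
--         pow *= 2
--
--     return ans
-- ===== SOURCE B (Python) =====
-- def solve(A, B):
--     # Closed form: 2^B * (2^A - 1), with the counts clamped at 0 just as range() treats
--     # negative arguments as empty. Two shifts instead of A+B multiplications.
--     return ((1 << max(A, 0)) - 1) << max(B, 0)
-- ===== Notes on version B (the rewrite author's own statement) =====
-- stated objective: faster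
-- what changed: Replaces the two doubling loops (B squarings then A add-and-double steps) by the closed form ((1<<max(A,0))-1)<<max(B,0); intended as faster (asymptotically O(1) shifts vs O(A+B) multiplications; a timing run measured B 121x faster at n=16384, the largest size whose output both runs decoded).
import Mathlib
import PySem

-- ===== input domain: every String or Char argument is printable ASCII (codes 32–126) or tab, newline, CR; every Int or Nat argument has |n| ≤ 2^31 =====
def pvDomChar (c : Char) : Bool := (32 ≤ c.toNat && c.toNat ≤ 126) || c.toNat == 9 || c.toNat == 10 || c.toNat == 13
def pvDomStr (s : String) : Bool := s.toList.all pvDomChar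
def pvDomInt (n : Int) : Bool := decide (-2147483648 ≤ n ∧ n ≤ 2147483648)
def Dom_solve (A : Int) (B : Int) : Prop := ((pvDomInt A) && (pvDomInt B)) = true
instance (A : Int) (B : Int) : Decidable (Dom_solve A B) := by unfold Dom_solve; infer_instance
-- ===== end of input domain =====

-- B replaces A's two doubling loops by the closed form ((1 << max(A,0)) - 1) << max(B,0); intended as faster (measured 121x at n=16384 in a timing run).


-- ===== PORT A =====
def solve (A : Int) (B : Int) : Int :=
  let pow : Int := 1
  let ans : Int := 0
  let pow := (PySem.List.pyRange 0 B 1).foldl (fun p _ => p * 2) pow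
  let st := (PySem.List.pyRange 0 A 1).foldl (fun (s : Int × Int) _ => (s.1 + s.2, s.2 * 2)) (ans, pow)
  st.1

-- ===== PORT B =====
-- max(n, 0) as a shift count is exactly Int.toNat (clamps negatives to 0)
def solve_alt (A : Int) (B : Int) : Int :=
  (((1 : Int) <<< A.toNat) - 1) <<< B.toNat

-- ===== PRECONDITION & SPEC =====
def Spec_solve (A : Int) (B : Int) (out : Int) : Prop := out = solve_alt A B
instance (A : Int) (B : Int) (out : Int) : Decidable (Spec_solve A B out) := by unfold Spec_solve; infer_instance

-- ===== CLAIM (what is proved, stated in full; the proofs are below) =====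
def Claim_equal_solve : Prop := ∀ (A : Int) (B : Int), Dom_solve A B → Spec_solve A B (solve A B)

-- ===== LEMMAS AND PROOFS =====

-- A's first loop: repeated doubling over any index list multiplies by 2^length.
theorem foldl_double (l : List Int) : ∀ p : Int,
    l.foldl (fun p _ => p * 2) p = p * 2 ^ l.length := by
  induction l with
  | nil => intro p; simp
  | cons x t ih => intro p; simp [List.foldl, ih]; ring

-- A's second loop: add-and-double accumulates p * (2^length - 1).
theorem foldl_add_double (l : List Int) : ∀ a p : Int,
    l.foldl (fun (s : Int × Int) _ => (s.1 + s.2, s.2 * 2)) (a, p)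
      = (a + p * (2 ^ l.length - 1), p * 2 ^ l.length) := by
  induction l with
  | nil => intro a p; simp
  | cons x t ih => intro a p; simp [List.foldl, ih]; constructor <;> ring

-- ===== VERDICT (by name: the statement is the Claim_ definition above) =====
theorem solve_spec : Claim_equal_solve := by
  intro A B _
  unfold Spec_solve solve solve_alt
  simp only [foldl_double, foldl_add_double, PySem.List.length_pyRange_one,
    Int.shiftLeft_eq']
  have h2 : ∀ n : Int, ((n - 0).toNat = n.toNat) := by intro n; simp
  rw [h2 A, h2 B]
  push_cast
  ring
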